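-- pv_equiv track=rewrite | github.com/aitoralmeida/c4a_activity_recognition | new-experiments/activity_change_recognition/unsupervised/likelihood/RuLSIF/feature_extraction_RuLSIF_2.py | extract_features_from_sensors
-- ===== SOURCE A (Python) =====
-- def extract_features_from_sensors(actions, unique_actions, all_actions, position, timestamps, all_timestamps):
--     features_from_sensors = []
--
--     # count of events for each sensor in window
--     for action in unique_actions:
--         counter = 0
--         for action_fired in actions:
--             if action == action_fired:
--                 counter += 1
--         features_from_sensors.append(counter)
--
--     return features_from_sensors
-- ===== SOURCE B (Python) =====
-- def extract_features_from_sensors(actions, unique_actions, all_actions, position, timestamps, all_timestamps):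
--     # Group the output positions of each distinct unique action, tally the
--     # window's fired actions once, then write each tally to all its positions.
--     positions = {}
--     for i, action in enumerate(unique_actions):
--         positions.setdefault(action, []).append(i)
--     counts = {}
--     for action_fired in actions:
--         counts[action_fired] = counts.get(action_fired, 0) + 1
--     result = [0] * len(unique_actions)
--     for action, pos_list in positions.items():
--         c = counts.get(action, 0)
--         for i in pos_list:
--             result[i] = c
--     return result
-- ===== Notes on version B (the rewrite author's own statement) =====
-- stated objective: faster
-- what changed: Inverts the computation: groups the output positions of each distinct unique action, tallies the fired actions in one pass, then writes each tally to all its positions, instead of rescanning `actions` once per unique action.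
import Mathlib
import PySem

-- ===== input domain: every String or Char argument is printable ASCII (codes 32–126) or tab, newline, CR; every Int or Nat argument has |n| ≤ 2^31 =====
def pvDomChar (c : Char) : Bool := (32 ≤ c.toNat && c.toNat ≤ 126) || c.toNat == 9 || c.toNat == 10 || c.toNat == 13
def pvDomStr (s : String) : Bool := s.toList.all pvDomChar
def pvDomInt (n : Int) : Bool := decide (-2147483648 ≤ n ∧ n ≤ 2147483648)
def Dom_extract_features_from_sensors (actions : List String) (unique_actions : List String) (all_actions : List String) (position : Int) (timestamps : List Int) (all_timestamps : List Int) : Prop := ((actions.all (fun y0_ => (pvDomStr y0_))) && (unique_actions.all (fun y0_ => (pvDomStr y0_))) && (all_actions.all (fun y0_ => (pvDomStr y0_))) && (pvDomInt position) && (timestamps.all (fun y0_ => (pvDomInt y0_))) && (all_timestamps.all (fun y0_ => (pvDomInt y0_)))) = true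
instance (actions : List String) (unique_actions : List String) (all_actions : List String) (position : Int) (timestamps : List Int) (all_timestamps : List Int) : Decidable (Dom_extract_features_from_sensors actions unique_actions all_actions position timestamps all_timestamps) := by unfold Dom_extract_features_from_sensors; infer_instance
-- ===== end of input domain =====

-- ===== PORT A =====
def extract_features_from_sensors (actions : List String) (unique_actions : List String) (all_actions : List String) (position : Int) (timestamps : List Int) (all_timestamps : List Int) : List Int :=
  unique_actions.foldl (fun features_from_sensors action =>
    features_from_sensors ++ [actions.foldl (fun counter action_fired =>
      if action = action_fired then counter + 1 else counter) 0]) []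

-- ===== PORT B =====
-- B groups the output positions of each distinct unique action, tallies the
-- fired actions once, then writes each tally to all its positions.
-- (`positions.setdefault(a, []).append(i)` is ported as `modify a [] (· ++ [i])`,
--  which is exactly that statement's effect on the dict.)
def extract_features_from_sensors_alt (actions : List String) (unique_actions : List String) (all_actions : List String) (position : Int) (timestamps : List Int) (all_timestamps : List Int) : List Int :=
  let positions : PySem.Dict String (List Int) :=
    (PySem.List.enumerate unique_actions 0).foldl
      (fun d p => d.modify p.2 [] (· ++ [p.1])) PySem.Dict.empty
  let counts : PySem.Dict String Int :=
    actions.foldl (fun d a => d.insert a (d.getD a 0 + 1)) PySem.Dict.empty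
  let result : List Int := List.replicate unique_actions.length 0
  positions.items.foldl (fun r q =>
    q.2.foldl (fun r i => PySem.List.pySetD r i (counts.getD q.1 0)) r) result

-- ===== PRECONDITION & SPEC =====
def Spec_extract_features_from_sensors (actions : List String) (unique_actions : List String) (all_actions : List String) (position : Int) (timestamps : List Int) (all_timestamps : List Int) (out : List Int) : Prop := out = extract_features_from_sensors_alt actions unique_actions all_actions position timestamps all_timestamps
instance (actions : List String) (unique_actions : List String) (all_actions : List String) (position : Int) (timestamps : List Int) (all_timestamps : List Int) (out : List Int) : Decidable (Spec_extract_features_from_sensors actions unique_actions all_actions position timestamps all_timestamps out) := by unfold Spec_extract_features_from_sensors; infer_instance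

-- ===== CLAIM =====
def Claim_equal_extract_features_from_sensors : Prop := ∀ (actions : List String) (unique_actions : List String) (all_actions : List String) (position : Int) (timestamps : List Int) (all_timestamps : List Int), Dom_extract_features_from_sensors actions unique_actions all_actions position timestamps all_timestamps → Spec_extract_features_from_sensors actions unique_actions all_actions position timestamps all_timestamps (extract_features_from_sensors actions unique_actions all_actions position timestamps all_timestamps)

-- ===== LEMMAS AND PROOFS =====

-- A's fold produces the per-unique-action counts.
lemma A_foldl_count (actions : List String) (ua : List String) (acc : List Int) :
    ua.foldl (fun fs action => fs ++ [actions.foldl (fun c af => if action = af then c + 1 else c) 0]) acc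
      = acc ++ ua.map (fun action => (actions.count action : Int)) := by
  induction ua generalizing acc with
  | nil => simp
  | cons a t ih =>
      simp only [List.foldl_cons, List.map_cons, ih]
      have h : ∀ (l : List String) (c : Int),
          l.foldl (fun c af => if a = af then c + 1 else c) c = c + (l.count a : Int) := by
        intro l
        induction l with
        | nil => simp
        | cons x xs ihl =>
            intro c
            simp only [List.foldl_cons, ihl, List.count_cons]
            by_cases hx : a = x
            · simp [hx]; ring
            · have hx' : ¬ (x = a) := fun h' => hx h'.symm
              simp [hx, hx']
      simp [h actions 0]

-- The index built over `enumerate` maps a to the (ordered) positions of a in ua.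
lemma index_getD (ua : List String) (a : String) :
    ((PySem.List.enumerate ua 0).foldl
      (fun d p => d.modify p.2 [] (· ++ [p.1])) PySem.Dict.empty).getD a []
      = ((PySem.List.enumerate ua 0).filter (fun p => p.2 == a)).map (·.1) := by
  have hswap : (PySem.List.enumerate ua 0).foldl
      (fun d p => d.modify p.2 [] (· ++ [p.1])) (PySem.Dict.empty : PySem.Dict String (List Int))
      = (((PySem.List.enumerate ua 0).map Prod.swap).foldl
          (fun d p => d.modify p.1 [] (· ++ [p.2])) PySem.Dict.empty) := by
    rw [List.foldl_map]
    simp [Prod.swap]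
  rw [hswap, PySem.Dict.getD_foldl_modify_append]
  simp [List.filter_map, List.map_map, Function.comp_def, PySem.Dict.getD_empty]

-- Membership in an index list: position k with ua[k] = a.
lemma mem_index (ua : List String) (a : String) (j : Int) :
    j ∈ ((PySem.List.enumerate ua 0).filter (fun p => p.2 == a)).map (·.1)
      ↔ ∃ (k : Nat) (h : k < ua.length), j = (k : Int) ∧ ua[k] = a := by
  simp only [List.mem_map, List.mem_filter, PySem.List.mem_enumerate_iff]
  constructor
  · rintro ⟨p, ⟨⟨k, hk, rfl⟩, hpa⟩, rfl⟩
    exact ⟨k, hk, by simp, by simpa using hpa⟩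
  · rintro ⟨k, hk, rfl, ha⟩
    exact ⟨((k : Int), ua[k]), ⟨⟨k, hk, by simp⟩, by simpa using ha⟩, rfl⟩

-- Writing v at every (nonnegative) position of l: position k receives v iff k ∈ l.
lemma setAll_length (l : List Int) (v : Int) (r : List Int) :
    (l.foldl (fun r i => PySem.List.pySetD r i v) r).length = r.length := by
  induction l generalizing r with
  | nil => rfl
  | cons i t ih => simp [ih, PySem.List.length_pySetD]

lemma setAll_get (k : Nat) (v : Int) (l : List Int) : ∀ (r : List Int) (hk : k < r.length),
    (∀ j ∈ l, 0 ≤ j) →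
    (l.foldl (fun r i => PySem.List.pySetD r i v) r)[k]?
      = some (if (k : Int) ∈ l then v else r[k]) := by
  induction l with
  | nil => intro r hk _; simp [List.getElem?_eq_getElem hk]
  | cons i t ih =>
      intro r hk h0
      have hi : 0 ≤ i := h0 i (by simp)
      have hset : PySem.List.pySetD r i v = r.set i.toNat v :=
        PySem.List.pySetD_of_nonneg _ _ hi
      have hk' : k < (r.set i.toNat v).length := by simpa using hk
      rw [List.foldl_cons, hset, ih _ hk' (fun j hj => h0 j (by simp [hj]))]
      by_cases hmt : (k : Int) ∈ t
      · simp [hmt, List.mem_cons]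
      · by_cases hki : (k : Int) = i
        · have hkn : i.toNat = k := by omega
          simp [hki, List.mem_cons, hkn]
        · have hkn : ¬ i.toNat = k := by omega
          simp [hmt, hki, List.mem_cons, hkn]

-- The fill over the grouped items: position k (owned by action a0 only) ends
-- with a0's tally if some item's position list contains it.
lemma fill_length (L : List (String × List Int)) (c : PySem.Dict String Int) (r : List Int) :
    (L.foldl (fun r q => q.2.foldl (fun r i => PySem.List.pySetD r i (c.getD q.1 0)) r) r).length
      = r.length := by
  induction L generalizing r with
  | nil => rfl
  | cons q t ih => rw [List.foldl_cons, ih, setAll_length]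

lemma fill_get (c : PySem.Dict String Int) (a0 : String) (k : Nat) (L : List (String × List Int)) :
    ∀ (r : List Int) (hk : k < r.length),
    (∀ q ∈ L, ∀ j ∈ q.2, 0 ≤ j) →
    (∀ q ∈ L, (k : Int) ∈ q.2 → q.1 = a0) →
    (L.foldl (fun r q => q.2.foldl (fun r i => PySem.List.pySetD r i (c.getD q.1 0)) r) r)[k]?
      = some (if ∃ q ∈ L, (k : Int) ∈ q.2 then c.getD a0 0 else r[k]) := by
  induction L with
  | nil => intro r hk _ _; simp [List.getElem?_eq_getElem hk]
  | cons q t ih =>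
      intro r hk h0 ha
      have hlen : (q.2.foldl (fun r i => PySem.List.pySetD r i (c.getD q.1 0)) r).length = r.length :=
        setAll_length _ _ _
      have hsg := setAll_get k (c.getD q.1 0) q.2 r hk (h0 q (by simp))
      have hk2 : k < (q.2.foldl (fun r i => PySem.List.pySetD r i (c.getD q.1 0)) r).length := by omega
      have hval : (q.2.foldl (fun r i => PySem.List.pySetD r i (c.getD q.1 0)) r)[k]'hk2
          = if (k : Int) ∈ q.2 then c.getD q.1 0 else r[k] := by
        rw [List.getElem?_eq_getElem hk2] at hsg
        exact Option.some.inj hsg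
      rw [List.foldl_cons,
          ih _ (by omega) (fun q' hq' => h0 q' (by simp [hq'])) (fun q' hq' => ha q' (by simp [hq'])),
          hval]
      by_cases hq : (k : Int) ∈ q.2
      · have hqa : q.1 = a0 := ha q (by simp) hq
        by_cases hex : ∃ q' ∈ t, (k : Int) ∈ q'.2
        · simp [hq, hqa, hex]
        · have hex' : ∃ q' ∈ q :: t, (k : Int) ∈ q'.2 := ⟨q, by simp, hq⟩
          simp [hq, hqa, hex, hex']
      · by_cases hex : ∃ q' ∈ t, (k : Int) ∈ q'.2
        · have hex' : ∃ q' ∈ q :: t, (k : Int) ∈ q'.2 := by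
            rcases hex with ⟨q', hq', hkq'⟩; exact ⟨q', by simp [hq'], hkq'⟩
          simp [hq, hex, hex']
        · have hex' : ¬ ∃ q' ∈ q :: t, (k : Int) ∈ q'.2 := by
            rintro ⟨q', hq', hkq'⟩
            rcases List.mem_cons.mp hq' with h' | h'
            · exact hq (h' ▸ hkq')
            · exact hex ⟨q', h', hkq'⟩
          simp [hq, hex, hex']

-- ===== VERDICT =====
theorem extract_features_from_sensors_spec : Claim_equal_extract_features_from_sensors := by
  intro actions unique_actions all_actions position timestamps all_timestamps _
  unfold Spec_extract_features_from_sensors extract_features_from_sensors extract_features_from_sensors_alt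
  rw [A_foldl_count]
  simp only [List.nil_append]
  set F : String → List Int :=
    fun a => ((PySem.List.enumerate unique_actions 0).filter (fun p => p.2 == a)).map (·.1) with hF
  set P : PySem.Dict String (List Int) :=
    (PySem.List.enumerate unique_actions 0).foldl
      (fun d p => d.modify p.2 [] (· ++ [p.1])) PySem.Dict.empty with hP
  have hPgetD : ∀ a, P.getD a [] = F a := fun a => index_getD unique_actions a
  have hnodup : P.keys.Nodup := by
    rw [hP]
    exact PySem.Dict.nodup_keys_foldl_modify_key _ (fun (p : Int × String) => p.2) []
      (fun (_ : PySem.Dict String (List Int)) (x : Int × String) (v : List Int) => v ++ [x.1]) _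
      (by rw [PySem.Dict.keys_empty]; exact List.nodup_nil)
  have hitems : ∀ q ∈ P.items, q.2 = F q.1 := by
    intro q hq
    have h1 : P.get? q.1 = some q.2 := by
      rcases q with ⟨a, v⟩; exact PySem.Dict.get?_of_mem_items P hq hnodup
    have h2 : P.getD q.1 [] = q.2 := PySem.Dict.getD_of_get?_eq_some P [] h1
    rw [hPgetD] at h2
    exact h2.symm
  set cD : PySem.Dict String Int :=
    actions.foldl (fun d a => d.insert a (d.getD a 0 + 1)) PySem.Dict.empty with hc
  have hcount : ∀ a, cD.getD a 0 = (actions.count a : Int) := by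
    intro a
    rw [hc, PySem.Dict.getD_foldl_insert_add_one, PySem.Dict.getD_empty]
    simp
  apply List.ext_getElem?
  intro k
  by_cases hk : k < unique_actions.length
  · have hkF : (k : Int) ∈ F unique_actions[k] :=
      (mem_index unique_actions unique_actions[k] (k : Int)).2 ⟨k, hk, rfl, rfl⟩
    have hget? : P.get? unique_actions[k] = some (F unique_actions[k]) := by
      cases h : P.get? unique_actions[k] with
      | none =>
          have := PySem.Dict.getD_of_get?_eq_none P ([] : List Int) h
          rw [hPgetD] at this
          rw [this] at hkF
          exact absurd hkF (List.not_mem_nil)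
      | some v =>
          have h2 : P.getD unique_actions[k] [] = v := PySem.Dict.getD_of_get?_eq_some P [] h
          rw [hPgetD] at h2
          rw [h2]
    have hmemitem : (unique_actions[k], F unique_actions[k]) ∈ P.items :=
      PySem.Dict.mem_items_of_get?_eq_some P hget?
    have h0 : ∀ q ∈ P.items, ∀ j ∈ q.2, 0 ≤ j := by
      intro q hq j hj
      rw [hitems q hq] at hj
      rcases (mem_index unique_actions q.1 j).1 hj with ⟨m, hm, rfl, _⟩
      positivity
    have ha : ∀ q ∈ P.items, (k : Int) ∈ q.2 → q.1 = unique_actions[k] := by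
      intro q hq hkq
      rw [hitems q hq] at hkq
      rcases (mem_index unique_actions q.1 (k : Int)).1 hkq with ⟨m, hm, hkm, hma⟩
      have : k = m := by exact_mod_cast hkm
      subst this
      exact hma.symm
    rw [List.getElem?_map, List.getElem?_eq_getElem hk,
        fill_get cD unique_actions[k] k P.items _ (by simpa using hk) h0 ha]
    have hex : ∃ q ∈ P.items, (k : Int) ∈ q.2 :=
      ⟨(unique_actions[k], F unique_actions[k]), hmemitem, hkF⟩
    rw [if_pos hex, hcount]
    simp
  · have hk := Nat.le_of_not_lt hk
    have hlen := fill_length P.items cD (List.replicate unique_actions.length (0 : Int))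
    rw [List.getElem?_eq_none (by rw [List.length_map]; exact hk),
        List.getElem?_eq_none (by rw [hlen, List.length_replicate]; exact hk)]
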